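-- pv_equiv track=rewrite | github.com/RaduTulcan/Spatio-Temporal-Model-Checker | SpatioTemporalEvaluator.py | generate_trace
-- ===== SOURCE A (Python) =====
-- import copy
--
-- def generate_trace(trace_model, grid_size):
--     empty_grid = [[[] for _ in range(0, grid_size[1])] for _ in range(0, grid_size[0])]
--     trace_length = len(trace_model[0][0].split(";"))
--
--     trace = [copy.deepcopy(empty_grid) for _ in range(0, trace_length)]
--
--     for i in range(0, grid_size[0]):
--         for j in range(0, grid_size[1]):
--             point_time_evolution = trace_model[i][j].split(";")
--
--             for k in range(0, trace_length):
--                 if point_time_evolution[k] == "":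
--                     trace[k][i][j] = []
--                 else:
--                     trace[k][i][j] = point_time_evolution[k].split(",")
--     return trace
-- ===== SOURCE B (Python) =====
-- def generate_trace(trace_model, grid_size):
--     rows, cols = grid_size
--     trace_length = trace_model[0][0].count(";") + 1
--     rem = [[trace_model[i][j] for j in range(cols)] for i in range(rows)]
--     trace = []
--     for _ in range(trace_length):
--         frame = []
--         next_rem = []
--         for row in rem:
--             parts = [s.partition(";") for s in row]
--             frame.append([[] if head == "" else head.split(",") for head, _, _ in parts])
--             next_rem.append([rest for _, _, rest in parts])
--         trace.append(frame)
--         rem = next_rem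
--     return trace
-- ===== Notes on version B (the rewrite author's own statement) =====
-- stated objective: alternative
-- what changed: A splits every cell fully by ';' up front and scatters trace[k][i][j] assignments into a preallocated deep-copied 3D grid; B never materializes the per-cell segment lists: it gets the frame count from a ';'-count, keeps a grid of remaining-suffix strings, and repeatedly peels one segment off every cell with str.partition, producing the frames in time order as a streaming unfold.
import Mathlib
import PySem

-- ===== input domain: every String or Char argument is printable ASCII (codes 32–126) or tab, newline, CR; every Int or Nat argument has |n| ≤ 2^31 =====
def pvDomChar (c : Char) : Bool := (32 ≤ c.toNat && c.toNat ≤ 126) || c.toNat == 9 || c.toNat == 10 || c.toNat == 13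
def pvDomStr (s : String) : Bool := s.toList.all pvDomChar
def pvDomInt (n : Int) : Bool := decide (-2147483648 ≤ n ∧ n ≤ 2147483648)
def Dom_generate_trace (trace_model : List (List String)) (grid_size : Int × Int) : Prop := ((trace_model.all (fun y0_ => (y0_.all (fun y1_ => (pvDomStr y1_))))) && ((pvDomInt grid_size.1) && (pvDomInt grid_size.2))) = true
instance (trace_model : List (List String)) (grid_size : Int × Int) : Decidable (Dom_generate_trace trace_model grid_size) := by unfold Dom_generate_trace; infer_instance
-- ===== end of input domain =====

-- B replaces A's split-everything-then-scatter-into-a-deepcopied-preallocated-grid with a streaming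
-- unfold: a grid of remaining-suffix strings from which each frame is peeled with str.partition
-- (objective: alternative algorithm, same asymptotic cost).

-- ===== PORT A =====
-- s.split(sep) for a nonempty literal separator: split? is always `some` there, so getD [] is exact.
def pySplit (s sep : String) : List String := (PySem.Str.split? s sep).getD []

-- Port of A. Python's range(0, n) over an int n is List.range n.toNat (empty for n ≤ 0).
-- trace_model[0][0], trace_model[i][j] and point_time_evolution[k] would raise IndexError when out of
-- range; Pre_generate_trace excludes exactly those inputs, so the total getD/headD accesses are exact
-- on the claimed domain.  trace[k][i][j] = v is List.set/List.modify (indices are in range by construction).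
def generate_trace (trace_model : List (List String)) (grid_size : Int × Int) : List (List (List (List String))) :=
  let empty_grid : List (List (List String)) :=
    (List.range grid_size.1.toNat).map (fun _ => (List.range grid_size.2.toNat).map (fun _ => ([] : List String)))
  let trace_length := (pySplit ((trace_model.headD []).headD "") ";").length
  let trace := (List.range trace_length).map (fun _ => empty_grid)
  (List.range grid_size.1.toNat).foldl (fun trace i =>
    (List.range grid_size.2.toNat).foldl (fun trace j =>
      let point_time_evolution := pySplit ((trace_model.getD i []).getD j "") ";"
      (List.range trace_length).foldl (fun trace k =>
        trace.modify k (fun grid => grid.modify i (fun row =>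
          row.set j (if point_time_evolution.getD k "" = "" then []
                     else pySplit (point_time_evolution.getD k "") ",")))) trace) trace) trace

-- ===== PORT B =====
-- Port of B (Source B).  The per-cell state `rem` holds the not-yet-consumed suffix of each cell's
-- string; strings in `rem` are represented as List Char (the PySem convention for string work).
-- s.partition(";") has no PySem primitive, so it is ported by hand: peelC scans to the first ';'
-- and returns (text before it, text after it), and ([], []) resp. (s, []) when ';' is absent —
-- exact for the single-character separator ';' (Source B only destructures the first and third fields).
def peelC : List Char → List Char × List Char
  | [] => ([], [])
  | d :: rest => if d = ';' then ([], rest) else ((d :: (peelC rest).1), (peelC rest).2)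

-- '[] if head == "" else head.split(",")' on the peeled head
def parseHead (cs : List Char) : List String :=
  if cs = [] then [] else pySplit (String.ofList cs) ","

-- one iteration of Source B's inner row loop: the frame row and the new remainder row
def stepRow (row : List (List Char)) : List (List String) × List (List Char) :=
  let parts := row.map peelC
  (parts.map (fun p => parseHead p.1), parts.map (fun p => p.2))

-- Source B's 'for _ in range(trace_length)' loop, which appends one frame per iteration
def buildFrames : Nat → List (List (List Char)) → List (List (List (List String)))
  | 0, _ => []
  | n + 1, rem =>
      let stepped := rem.map stepRow
      (stepped.map (fun r => r.1)) :: buildFrames n (stepped.map (fun r => r.2))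

def generate_trace_alt (trace_model : List (List String)) (grid_size : Int × Int) : List (List (List (List String))) :=
  let rows := grid_size.1.toNat
  let cols := grid_size.2.toNat
  let trace_length := PySem.Str.count ((trace_model.headD []).headD "") ";" + 1
  let rem : List (List (List Char)) :=
    (List.range rows).map (fun i => (List.range cols).map (fun j => ((trace_model.getD i []).getD j "").toList))
  buildFrames trace_length rem

-- ===== PRECONDITION & SPEC =====
-- Pre_ excludes exactly the inputs on which Python A raises IndexError: a missing first cell
-- trace_model[0][0], a grid_size whose loops index past trace_model's rows/columns, or a visited
-- cell with fewer ';'-segments than trace_model[0][0] has (when grid_size[1] <= 0 no cell is read).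
def Pre_generate_trace (trace_model : List (List String)) (grid_size : Int × Int) : Prop :=
  trace_model ≠ [] ∧ trace_model.headD [] ≠ [] ∧
  (0 < grid_size.2.toNat → grid_size.1.toNat ≤ trace_model.length) ∧
  ∀ row ∈ trace_model.take grid_size.1.toNat,
    grid_size.2.toNat ≤ row.length ∧
    ∀ c ∈ row.take grid_size.2.toNat,
      (pySplit ((trace_model.headD []).headD "") ";").length ≤ (pySplit c ";").length
instance (trace_model : List (List String)) (grid_size : Int × Int) : Decidable (Pre_generate_trace trace_model grid_size) := by unfold Pre_generate_trace; infer_instance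

def pvWitness_generate_trace : List (List String) × (Int × Int) :=
  ([["a;b", "1,2;"], [";c", "x;y,z"]], (2, 2))

def Spec_generate_trace (trace_model : List (List String)) (grid_size : Int × Int) (out : List (List (List (List String)))) : Prop := out = generate_trace_alt trace_model grid_size
instance (trace_model : List (List String)) (grid_size : Int × Int) (out : List (List (List (List String)))) : Decidable (Spec_generate_trace trace_model grid_size out) := by unfold Spec_generate_trace; infer_instance

-- ===== CLAIM (what is proved, stated in full; the proofs are below) =====
def Claim_equal_generate_trace : Prop := ∀ (trace_model : List (List String)) (grid_size : Int × Int), Dom_generate_trace trace_model grid_size → Pre_generate_trace trace_model grid_size → Spec_generate_trace trace_model grid_size (generate_trace trace_model grid_size)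

-- ===== LEMMAS AND PROOFS =====

-- the parsed value of cell (i,j) at time k (the common pointwise semantics of both ports)
def pvVal (tm : List (List String)) (i j k : Nat) : List String :=
  let pte := pySplit ((tm.getD i []).getD j "") ";"
  if pte.getD k "" = "" then [] else pySplit (pte.getD k "") ","

-- the canonical k-outer map grid both ports are reduced to
def pvM (L n0 n1 : Nat) (e : Nat → Nat → Nat → List String) : List (List (List (List String))) :=
  (List.range L).map (fun k => (List.range n0).map (fun i => (List.range n1).map (fun j => e k i j)))

theorem pvM_congr {L n0 n1 : Nat} {e e' : Nat → Nat → Nat → List String}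
    (h : ∀ k i j, k < L → i < n0 → j < n1 → e k i j = e' k i j) :
    pvM L n0 n1 e = pvM L n0 n1 e' := by
  unfold pvM
  refine List.map_congr_left (fun k hk => ?_)
  refine List.map_congr_left (fun i hi => ?_)
  refine List.map_congr_left (fun j hj => ?_)
  exact h k i j (List.mem_range.mp hk) (List.mem_range.mp hi) (List.mem_range.mp hj)

theorem set_map_range {α : Type} (n j0 : Nat) (f : Nat → α) (v : α) :
    ((List.range n).map f).set j0 v
      = (List.range n).map (fun j => if j = j0 ∧ j0 < n then v else f j) := by
  apply List.ext_getElem (by simp)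
  intro t h1 h2
  simp only [List.getElem_set, List.getElem_map, List.getElem_range]
  simp only [List.length_set, List.length_map, List.length_range] at h1
  by_cases hb : j0 = t
  · subst hb; rw [if_pos rfl, if_pos ⟨rfl, h1⟩]
  · rw [if_neg hb, if_neg (fun h => hb h.1.symm)]

theorem modify_map_range {α : Type} (n k0 : Nat) (f : Nat → α) (g : α → α) (_hk0 : k0 < n) :
    ((List.range n).map f).modify k0 g
      = (List.range n).map (fun k => if k = k0 then g (f k) else f k) := by
  apply List.ext_getElem (by simp)
  intro t h1 h2
  rw [List.getElem_modify]
  simp only [List.getElem_map, List.getElem_range]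
  simp only [List.length_modify, List.length_map, List.length_range] at h1
  by_cases hb : k0 = t
  · subst hb; simp
  · rw [if_neg hb, if_neg (fun h => hb h.symm)]

-- one assignment trace[k0][i0][j0] = v on the canonical grid
theorem upd_pvM (L n0 n1 k0 i0 j0 : Nat) (v : List String) (e : Nat → Nat → Nat → List String)
    (hk : k0 < L) (hi : i0 < n0) (hj : j0 < n1) :
    (pvM L n0 n1 e).modify k0 (fun grid => grid.modify i0 (fun row => row.set j0 v))
      = pvM L n0 n1 (fun k i j => if k = k0 ∧ i = i0 ∧ j = j0 then v else e k i j) := by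
  unfold pvM
  rw [modify_map_range _ _ _ _ hk]
  refine List.map_congr_left (fun k hkm => ?_)
  by_cases hkk : k = k0
  · subst hkk
    rw [if_pos rfl, modify_map_range _ _ _ _ hi]
    refine List.map_congr_left (fun i him => ?_)
    by_cases hii : i = i0
    · subst hii
      rw [if_pos rfl, set_map_range]
      refine List.map_congr_left (fun j hjm => ?_)
      split_ifs <;> simp_all
    · simp only [if_neg hii]
      refine List.map_congr_left (fun j hjm => ?_)
      split_ifs <;> simp_all
  · simp only [if_neg hkk]
    refine List.map_congr_left (fun i him => ?_)
    refine List.map_congr_left (fun j hjm => ?_)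
    split_ifs <;> simp_all

-- the innermost k-loop at a fixed (i0, j0)
theorem foldK (L n0 n1 i0 j0 : Nat) (w : Nat → List String) (e : Nat → Nat → Nat → List String)
    (hi : i0 < n0) (hj : j0 < n1) :
    ∀ r, r ≤ L →
      (List.range r).foldl (fun trace k =>
          trace.modify k (fun grid => grid.modify i0 (fun row => row.set j0 (w k)))) (pvM L n0 n1 e)
        = pvM L n0 n1 (fun k i j => if i = i0 ∧ j = j0 ∧ k < r then w k else e k i j) := by
  intro r
  induction r with
  | zero => intro _; simp
  | succ r ih =>
      intro hr
      rw [List.range_succ, List.foldl_append, ih (by omega)]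
      simp only [List.foldl_cons, List.foldl_nil]
      rw [upd_pvM L n0 n1 r i0 j0 _ _ (by omega) hi hj]
      refine pvM_congr (fun k i j hk hi' hj' => ?_)
      by_cases h1 : i = i0 ∧ j = j0
      · obtain ⟨rfl, rfl⟩ := h1
        by_cases h2 : k = r
        · subst h2; simp
        · rw [if_neg (fun h => h2 h.1)]
          by_cases h3 : k < r
          · rw [if_pos ⟨rfl, rfl, h3⟩, if_pos ⟨rfl, rfl, by omega⟩]
          · rw [if_neg (fun h => h3 h.2.2), if_neg (fun h => absurd h.2.2 (by omega))]
      · rw [if_neg (fun h => h1 ⟨h.2.1, h.2.2⟩), if_neg (fun h => h1 ⟨h.1, h.2.1⟩),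
            if_neg (fun h => h1 ⟨h.1, h.2.1⟩)]

-- the middle j-loop at a fixed row i0
theorem foldJ (L n0 n1 i0 : Nat) (w : Nat → Nat → List String) (e : Nat → Nat → Nat → List String)
    (hi : i0 < n0) :
    ∀ q, q ≤ n1 →
      (List.range q).foldl (fun trace j =>
          (List.range L).foldl (fun trace k =>
            trace.modify k (fun grid => grid.modify i0 (fun row => row.set j (w j k)))) trace)
        (pvM L n0 n1 e)
        = pvM L n0 n1 (fun k i j => if i = i0 ∧ j < q then w j k else e k i j) := by
  intro q
  induction q with
  | zero => intro _; simp
  | succ q ih =>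
      intro hq
      rw [List.range_succ, List.foldl_append, ih (by omega)]
      simp only [List.foldl_cons, List.foldl_nil]
      rw [foldK L n0 n1 i0 q (w q) _ hi (by omega) L (le_refl L)]
      refine pvM_congr (fun k i j hk hi' hj' => ?_)
      by_cases h1 : i = i0
      · subst h1
        by_cases h2 : j = q
        · subst h2; simp [hk]
        · rw [if_neg (fun h => h2 h.2.1)]
          by_cases h3 : j < q
          · rw [if_pos ⟨rfl, h3⟩, if_pos ⟨rfl, by omega⟩]
          · rw [if_neg (fun h => h3 h.2), if_neg (fun h => absurd h.2 (by omega))]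
      · rw [if_neg (fun h => h1 h.1), if_neg (fun h => h1 h.1), if_neg (fun h => h1 h.1)]

-- the outer i-loop
theorem foldI (L n0 n1 : Nat) (w : Nat → Nat → Nat → List String) (e : Nat → Nat → Nat → List String) :
    ∀ p, p ≤ n0 →
      (List.range p).foldl (fun trace i =>
          (List.range n1).foldl (fun trace j =>
            (List.range L).foldl (fun trace k =>
              trace.modify k (fun grid => grid.modify i (fun row => row.set j (w i j k)))) trace) trace)
        (pvM L n0 n1 e)
        = pvM L n0 n1 (fun k i j => if i < p then w i j k else e k i j) := by
  intro p
  induction p with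
  | zero => intro _; simp
  | succ p ih =>
      intro hp
      rw [List.range_succ, List.foldl_append, ih (by omega)]
      simp only [List.foldl_cons, List.foldl_nil]
      rw [foldJ L n0 n1 p (w p) _ (by omega) n1 (le_refl n1)]
      refine pvM_congr (fun k i j hk hi' hj' => ?_)
      by_cases h1 : i = p
      · subst h1; simp [hj']
      · rw [if_neg (fun h => h1 h.1)]
        by_cases h3 : i < p
        · rw [if_pos h3, if_pos (by omega)]
        · rw [if_neg h3, if_neg (by omega)]

-- Port A computes the canonical grid (no precondition needed on the Lean side).
theorem A_eq_pvM (tm : List (List String)) (gs : Int × Int) :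
    generate_trace tm gs
      = pvM ((pySplit ((tm.headD []).headD "") ";").length) gs.1.toNat gs.2.toNat
          (fun k i j => pvVal tm i j k) := by
  show (List.range gs.1.toNat).foldl (fun trace i =>
          (List.range gs.2.toNat).foldl (fun trace j =>
            (List.range ((pySplit ((tm.headD []).headD "") ";").length)).foldl (fun trace k =>
              trace.modify k (fun grid => grid.modify i (fun row => row.set j (pvVal tm i j k)))) trace) trace)
        (pvM ((pySplit ((tm.headD []).headD "") ";").length) gs.1.toNat gs.2.toNat (fun _ _ _ => []))
      = _
  rw [foldI _ _ _ _ _ gs.1.toNat (le_refl _)]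
  exact pvM_congr (fun k i j _ hi _ => by simp [hi])

-- ----- B-side lemmas: split / count / partition on a single-character separator -----

-- prepend to the first piece (what splitOn.go's accumulator `cur` contributes)
def consFst (pre : List Char) : List (List Char) → List (List Char)
  | [] => [pre]
  | p :: ps => (pre ++ p) :: ps

-- structural single-character split, the common reference point of split and peel
def mySplit (c : Char) : List Char → List (List Char)
  | [] => [[]]
  | d :: rest => if d = c then [] :: mySplit c rest else consFst [d] (mySplit c rest)

theorem mySplit_ne_nil (c : Char) (l : List Char) : mySplit c l ≠ [] := by
  cases l with
  | nil => simp [mySplit]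
  | cons d t =>
      simp only [mySplit]
      split_ifs
      · simp
      · cases h : mySplit c t <;> simp [consFst]

theorem splitOn_go_step (c d : Char) (t : List Char) (fuel : Nat) (cur : List Char)
    (acc : List (List Char)) :
    PySem.Chars.splitOn.go [c] (fuel + 1) (d :: t) cur acc
      = if c = d then PySem.Chars.splitOn.go [c] fuel t [] (cur.reverse :: acc)
        else PySem.Chars.splitOn.go [c] fuel t (d :: cur) acc := by
  simp only [PySem.Chars.splitOn.go, List.isPrefixOf, Bool.and_true, List.length_cons,
    List.length_nil, Nat.zero_add, List.drop_succ_cons, List.drop_zero]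
  split_ifs with h1 h2 <;> simp_all

theorem splitOn_go_eq (c : Char) :
    ∀ (l : List Char) (fuel : Nat), l.length ≤ fuel → ∀ (cur : List Char) (acc : List (List Char)),
      PySem.Chars.splitOn.go [c] fuel l cur acc = acc.reverse ++ consFst cur.reverse (mySplit c l) := by
  intro l
  induction l with
  | nil =>
      intro fuel _ cur acc
      cases fuel <;> simp [PySem.Chars.splitOn.go, mySplit, consFst]
  | cons d t ih =>
      intro fuel hf cur acc
      cases fuel with
      | zero => simp at hf
      | succ fuel =>
          rw [splitOn_go_step]
          by_cases hcd : c = d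
          · subst hcd
            rw [if_pos rfl, ih fuel (by simpa using hf) [] (cur.reverse :: acc)]
            simp only [mySplit]
            cases h : mySplit c t with
            | nil => exact absurd h (mySplit_ne_nil c t)
            | cons p ps => simp [consFst]
          · rw [if_neg hcd, ih fuel (by simpa using hf) (d :: cur) acc]
            have hdc : ¬ d = c := fun h => hcd h.symm
            simp only [mySplit, if_neg hdc]
            cases h : mySplit c t with
            | nil => exact absurd h (mySplit_ne_nil c t)
            | cons p ps => simp [consFst]

theorem splitOn_single (c : Char) (l : List Char) :
    PySem.Chars.splitOn l [c] = mySplit c l := by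
  unfold PySem.Chars.splitOn
  rw [splitOn_go_eq c l (l.length + 1) (by omega) [] []]
  cases h : mySplit c l with
  | nil => exact absurd h (mySplit_ne_nil c l)
  | cons p ps => simp [consFst]

theorem count_go_step (c d : Char) (t : List Char) (fuel acc : Nat) :
    PySem.Chars.count.go [c] (fuel + 1) (d :: t) acc
      = if c = d then PySem.Chars.count.go [c] fuel t (acc + 1)
        else PySem.Chars.count.go [c] fuel t acc := by
  simp only [PySem.Chars.count.go, List.isPrefixOf, Bool.and_true, List.length_cons,
    List.length_nil, Nat.zero_add, List.drop_succ_cons, List.drop_zero]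
  split_ifs with h1 h2 <;> simp_all

theorem count_go_eq (c : Char) :
    ∀ (l : List Char) (fuel : Nat), l.length ≤ fuel → ∀ (acc : Nat),
      PySem.Chars.count.go [c] fuel l acc = acc + l.count c := by
  intro l
  induction l with
  | nil => intro fuel _ acc; cases fuel <;> simp [PySem.Chars.count.go]
  | cons d t ih =>
      intro fuel hf acc
      cases fuel with
      | zero => simp at hf
      | succ fuel =>
          rw [count_go_step]
          by_cases hcd : c = d
          · subst hcd
            rw [if_pos rfl, ih fuel (by simpa using hf) (acc + 1)]
            simp
            omega
          · rw [if_neg hcd, ih fuel (by simpa using hf) acc]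
            have hdc : (d == c) = false := by
              simp only [beq_eq_false_iff_ne]; exact fun h => hcd h.symm
            simp [List.count_cons, hdc]

theorem consFst_length (pre : List Char) (p : List Char) (ps : List (List Char)) :
    (consFst pre (p :: ps)).length = ps.length + 1 := by simp [consFst]

theorem mySplit_length (c : Char) (l : List Char) :
    (mySplit c l).length = l.count c + 1 := by
  induction l with
  | nil => simp [mySplit]
  | cons d t ih =>
      simp only [mySplit]
      by_cases hcd : d = c
      · subst hcd; simp [ih]
      · rw [if_neg hcd]
        cases h : mySplit c t with
        | nil => exact absurd h (mySplit_ne_nil c t)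
        | cons p ps =>
            rw [consFst_length]
            rw [h] at ih
            simp only [List.length_cons] at ih
            have hdc : (d == c) = false := by
              simp only [beq_eq_false_iff_ne]; exact hcd
            simp [List.count_cons, hdc, ih]

-- pySplit on ';' in terms of the structural split
theorem pySplit_semi (s : String) :
    pySplit s ";" = (mySplit ';' s.toList).map String.ofList := by
  rw [← splitOn_single]
  simp [pySplit, PySem.Str.split?, PySem.Chars.split?]

-- Source B's trace_length (';'-count + 1) is A's trace_length (the split's length)
theorem count_semi_eq_split_length (s : String) :
    PySem.Str.count s ";" + 1 = (pySplit s ";").length := by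
  have h1 : PySem.Str.count s ";" = PySem.Chars.count s.toList [';'] := by
    simp
  have h2 : PySem.Chars.count s.toList [';'] = PySem.Chars.count.go [';'] s.toList.length s.toList 0 := by
    simp [PySem.Chars.count]
  rw [pySplit_semi, List.length_map, mySplit_length, h1, h2,
      count_go_eq ';' s.toList s.toList.length (le_refl _) 0]
  omega

-- ----- partition (peelC) against the structural split -----

theorem peel_fst (l : List Char) : (mySplit ';' l).headD [] = (peelC l).1 := by
  induction l with
  | nil => simp [mySplit, peelC]
  | cons d t ih =>
      simp only [mySplit, peelC]
      by_cases hd : d = ';'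
      · subst hd; simp
      · rw [if_neg hd, if_neg hd]
        cases h : mySplit ';' t with
        | nil => exact absurd h (mySplit_ne_nil ';' t)
        | cons p ps =>
            rw [h] at ih
            simp only [List.headD_cons] at ih
            simp [consFst, ih]

theorem peel_snd (l : List Char) (hm : ';' ∈ l) :
    mySplit ';' (peelC l).2 = (mySplit ';' l).tail := by
  induction l with
  | nil => simp at hm
  | cons d t ih =>
      simp only [mySplit, peelC]
      by_cases hd : d = ';'
      · subst hd; simp
      · rw [if_neg hd, if_neg hd]
        have hm' : ';' ∈ t := by
          rcases List.mem_cons.mp hm with h | h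
          · exact absurd h.symm hd
          · exact h
        cases h : mySplit ';' t with
        | nil => exact absurd h (mySplit_ne_nil ';' t)
        | cons p ps =>
            rw [h] at ih
            simp only [List.tail_cons] at ih
            simp [consFst, ih hm']

theorem mySplit_not_mem (l : List Char) (hm : ';' ∉ l) : mySplit ';' l = [l] := by
  induction l with
  | nil => simp [mySplit]
  | cons d t ih =>
      have hd : d ≠ ';' := fun h => hm (by simp [h])
      have ht : ';' ∉ t := fun h => hm (List.mem_cons_of_mem _ h)
      simp [mySplit, hd, ih ht, consFst]

theorem mem_of_two_le (l : List Char) (h : 2 ≤ (mySplit ';' l).length) : ';' ∈ l := by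
  by_contra hm
  rw [mySplit_not_mem l hm] at h
  simp at h

-- ----- the unfold loop of port B against the canonical pointwise value -----

-- the parsed value of one cell at time k, stated over the cell's character list
def parseAt (cs : List Char) (k : Nat) : List String :=
  parseHead ((mySplit ';' cs).getD k [])

theorem buildFrames_spec :
    ∀ (n : Nat) (rem : List (List (List Char))),
      (∀ row ∈ rem, ∀ cs ∈ row, n ≤ (mySplit ';' cs).length) →
      buildFrames n rem
        = (List.range n).map (fun k => rem.map (fun row => row.map (fun cs => parseAt cs k))) := by
  intro n
  induction n with
  | zero => intro rem _; simp [buildFrames]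
  | succ n ih =>
      intro rem hrem
      have hframe : (rem.map stepRow).map (fun r => r.1)
          = rem.map (fun row => row.map (fun cs => parseAt cs 0)) := by
        rw [List.map_map]
        refine List.map_congr_left (fun row _ => ?_)
        simp only [Function.comp_apply, stepRow, List.map_map]
        refine List.map_congr_left (fun cs _ => ?_)
        simp only [Function.comp_apply, parseAt]
        rw [← peel_fst]
        cases h : mySplit ';' cs with
        | nil => exact absurd h (mySplit_ne_nil ';' cs)
        | cons p ps => simp
      have hstep : (rem.map stepRow).map (fun r => r.2)
          = rem.map (fun row => row.map (fun cs => (peelC cs).2)) := by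
        rw [List.map_map]
        refine List.map_congr_left (fun row _ => ?_)
        simp only [Function.comp_apply, stepRow, List.map_map]
        rfl
      have hrem' : ∀ row ∈ rem.map (fun row => row.map (fun cs => (peelC cs).2)),
          ∀ cs ∈ row, n ≤ (mySplit ';' cs).length := by
        intro row hrow cs hcs
        simp only [List.mem_map] at hrow
        obtain ⟨row0, hrow0, rfl⟩ := hrow
        simp only [List.mem_map] at hcs
        obtain ⟨cs0, hcs0, rfl⟩ := hcs
        have hlen := hrem row0 hrow0 cs0 hcs0
        by_cases hn : n = 0
        · subst hn; exact Nat.zero_le _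
        · have hmem : ';' ∈ cs0 := mem_of_two_le cs0 (by omega)
          rw [peel_snd cs0 hmem]
          cases h : mySplit ';' cs0 with
          | nil => exact absurd h (mySplit_ne_nil ';' cs0)
          | cons p ps =>
              rw [h] at hlen
              simp only [List.length_cons] at hlen
              simp only [List.tail_cons]
              omega
      have hrec : buildFrames n (rem.map (fun row => row.map (fun cs => (peelC cs).2)))
          = (List.range n).map (fun k =>
              rem.map (fun row => row.map (fun cs => parseAt cs (k + 1)))) := by
        rw [ih _ hrem']
        refine List.map_congr_left (fun k hk => ?_)
        rw [List.map_map]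
        refine List.map_congr_left (fun row hrow => ?_)
        simp only [Function.comp_apply, List.map_map]
        refine List.map_congr_left (fun cs hcs => ?_)
        simp only [Function.comp_apply, parseAt]
        have hlen := hrem row hrow cs hcs
        have hkn : k < n := List.mem_range.mp hk
        have hmem : ';' ∈ cs := mem_of_two_le cs (by omega)
        rw [peel_snd cs hmem]
        cases h : mySplit ';' cs with
        | nil => exact absurd h (mySplit_ne_nil ';' cs)
        | cons p ps => simp
      show (rem.map stepRow).map (fun r => r.1)
            :: buildFrames n ((rem.map stepRow).map (fun r => r.2)) = _
      rw [hframe, hstep, hrec, List.range_succ_eq_map]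
      simp [List.map_map]

-- getD through a map by String.ofList (the bridge from char lists back to strings)
theorem getD_map_ofList (l : List (List Char)) (k : Nat) :
    (l.map String.ofList).getD k "" = String.ofList (l.getD k []) := by
  induction l generalizing k with
  | nil => simp
  | cons p ps ih => cases k with
      | zero => simp
      | succ k => simp only [List.getD_cons_succ]; exact ih k

theorem ofList_eq_empty_iff (cs : List Char) : String.ofList cs = "" ↔ cs = [] := by
  constructor
  · intro h; have h2 := congrArg String.toList h; simp at h2; exact h2
  · rintro rfl; simp

-- one cell: B's peel-and-parse value is A's split-and-index value
theorem parseAt_eq_pvVal (tm : List (List String)) (i j k : Nat) :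
    parseAt ((tm.getD i []).getD j "").toList k = pvVal tm i j k := by
  unfold parseAt parseHead pvVal
  simp only [pySplit_semi, getD_map_ofList, ofList_eq_empty_iff]

-- a list element reached through getD, as a member of a take-prefix
theorem getD_mem_take {α : Type} [Inhabited α] (l : List α) (i n : Nat) (d : α)
    (hi : i < n) (hn : n ≤ l.length) : l.getD i d ∈ l.take n := by
  have hil : i < l.length := lt_of_lt_of_le hi hn
  rw [List.getD_eq_getElem l d hil]
  have : l[i] = (l.take n)[i]'(by simp [hil, hi]) := (List.getElem_take).symm
  rw [this]
  exact List.getElem_mem _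

-- Port B computes the canonical grid on every input admitted by Pre_.
theorem B_eq_pvM (tm : List (List String)) (gs : Int × Int) (hpre : Pre_generate_trace tm gs) :
    generate_trace_alt tm gs
      = pvM ((pySplit ((tm.headD []).headD "") ";").length) gs.1.toNat gs.2.toNat
          (fun k i j => pvVal tm i j k) := by
  obtain ⟨-, -, hrows, hcells⟩ := hpre
  unfold generate_trace_alt
  rw [count_semi_eq_split_length]
  rw [buildFrames_spec _ _ ?_]
  · unfold pvM
    refine List.map_congr_left (fun k _ => ?_)
    simp only [List.map_map]
    refine List.map_congr_left (fun i _ => ?_)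
    simp only [Function.comp, List.map_map]
    refine List.map_congr_left (fun j _ => ?_)
    simp only [Function.comp]
    exact parseAt_eq_pvVal tm i j k
  · intro row hrow cs hcs
    simp only [List.mem_map] at hrow
    obtain ⟨i, hi, rfl⟩ := hrow
    simp only [List.mem_map] at hcs
    obtain ⟨j, hj, rfl⟩ := hcs
    rw [List.mem_range] at hi hj
    have hrow_mem : tm.getD i [] ∈ tm.take gs.1.toNat :=
      getD_mem_take tm i gs.1.toNat [] hi (hrows (by omega))
    obtain ⟨hcols, hseg⟩ := hcells _ hrow_mem
    have hcell_mem : (tm.getD i []).getD j "" ∈ (tm.getD i []).take gs.2.toNat :=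
      getD_mem_take _ j gs.2.toNat "" hj hcols
    have := hseg _ hcell_mem
    rw [pySplit_semi ((tm.getD i []).getD j ""), List.length_map] at this
    exact le_trans this (le_refl _)

-- ===== VERDICT (by name: the statement is the Claim_ definition above) =====
theorem generate_trace_spec : Claim_equal_generate_trace := by
  intro tm gs _ hpre
  unfold Spec_generate_trace
  rw [A_eq_pvM, B_eq_pvM tm gs hpre]
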